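-- pv_equiv track=rewrite | github.com/freingruber/JavaScript-Raider | testcase_helpers.py | get_highest_variable_token_id
-- ===== SOURCE A (Python) =====
-- def get_highest_variable_token_id(code):
--     max_number_of_variables = 1000  # assuming that all testcases have less than 1000 variable names
--
--     highest = 1
--     for idx in range(max_number_of_variables):
--         variable_id = idx + 1
--         token_name = "var_%d_" % idx
--         if token_name in code:
--             highest = variable_id
--     return highest
-- ===== SOURCE B (Python) =====
-- def _token_id_at(code, i):
--     # parse a token "var_<canonical decimal id>_" starting at position i; return the id, or None
--     if code[i:i + 4] != "var_":
--         return None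
--     k = i + 4
--     v = 0
--     nd = 0
--     while k < len(code) and '0' <= code[k] <= '9':
--         v = v * 10 + (ord(code[k]) - 48)
--         nd += 1
--         k += 1
--     if nd == 0 or k >= len(code) or code[k] != '_':
--         return None
--     if nd > 1 and code[i + 4] == '0':
--         return None
--     return v if v < 1000 else None
--
--
-- def get_highest_variable_token_id(code):
--     # single left-to-right scan: extract every well-formed variable token id and keep the running maximum
--     best = 0
--     for i in range(len(code)):
--         v = _token_id_at(code, i)
--         if v is not None and v > best:
--             best = v
--     return best + 1
-- ===== Notes on version B (the rewrite author's own statement) =====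
-- stated objective: faster
-- what changed: A probes the code with 1000 separate substring-membership scans, one per candidate token id; B makes a single left-to-right scan that parses each variable token where it occurs (canonical decimal id below 1000) and keeps the running maximum id.
import Mathlib
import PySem

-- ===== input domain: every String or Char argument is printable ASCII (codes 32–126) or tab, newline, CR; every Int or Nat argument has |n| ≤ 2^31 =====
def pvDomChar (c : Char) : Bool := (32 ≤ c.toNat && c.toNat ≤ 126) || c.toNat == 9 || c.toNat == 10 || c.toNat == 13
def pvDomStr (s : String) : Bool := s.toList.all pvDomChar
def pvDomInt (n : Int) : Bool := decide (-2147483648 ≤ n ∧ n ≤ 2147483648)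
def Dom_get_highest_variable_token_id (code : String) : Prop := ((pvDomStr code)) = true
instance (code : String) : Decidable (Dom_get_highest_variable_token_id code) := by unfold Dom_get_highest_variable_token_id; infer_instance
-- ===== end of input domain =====

-- B replaces A's 1000 substring-membership probes by one left-to-right scan that parses each
-- "var_<id>_" token where it occurs and keeps the running maximum id (objective: faster).

-- ===== PORT A =====
def get_highest_variable_token_id (code : String) : Int :=
  (PySem.List.pyRange 0 1000).foldl
    (fun highest idx =>
      -- token_name = "var_%d_" % idx ; if token_name in code: highest = idx + 1
      if PySem.Chars.isIn (['v', 'a', 'r', '_'] ++ PySem.Int.toChars idx ++ ['_']) code.toList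
      then idx + 1 else highest)
    1

-- ===== PORT B =====
-- the digit loop of _token_id_at: consumes leading decimal digits ('0' <= c <= '9'),
-- accumulating the value (v = v*10 + (ord(c) - 48), exact hand port of the int arithmetic)
-- and the digit count nd; returns (v, nd, rest-of-input)
def pvDigits : List Char → Int → Nat → Int × Nat × List Char
  | [], v, nd => (v, nd, [])
  | c :: t, v, nd =>
    if '0' ≤ c ∧ c ≤ '9' then pvDigits t (v * 10 + ((c.toNat : Int) - 48)) (nd + 1)
    else (v, nd, c :: t)

-- _token_id_at(code, i) ported on the suffix code[i:]: parse "var_<canonical id>_", id < 1000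
def pvTokId : List Char → Option Int
  | 'v' :: 'a' :: 'r' :: '_' :: t =>
    match pvDigits t 0 0 with
    | (v, nd, r) =>
      match r with
      | [] => none                                        -- nd == 0 with nothing left, or k >= len(code)
      | c :: _ =>
        if nd = 0 then none
        else if c ≠ '_' then none
        else if 1 < nd ∧ t.headD ' ' = '0' then none      -- leading zero: not canonical
        else if v < 1000 then some v else none
  | _ => none                                             -- code[i:i+4] != "var_"

-- the main loop: for i in range(len(code)): keep the running maximum of the parsed ids
def pvScan : List Char → Int → Int
  | [], best => best
  | c :: t, best =>
    pvScan t (match pvTokId (c :: t) with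
              | some v => if v > best then v else best
              | none => best)

def get_highest_variable_token_id_alt (code : String) : Int :=
  pvScan code.toList 0 + 1

-- ===== PRECONDITION & SPEC =====
def Spec_get_highest_variable_token_id (code : String) (out : Int) : Prop := out = get_highest_variable_token_id_alt code
instance (code : String) (out : Int) : Decidable (Spec_get_highest_variable_token_id code out) := by unfold Spec_get_highest_variable_token_id; infer_instance

-- ===== CLAIM (what is proved, stated in full; the proofs are below) =====
def Claim_equal_get_highest_variable_token_id : Prop := ∀ (code : String), Dom_get_highest_variable_token_id code → Spec_get_highest_variable_token_id code (get_highest_variable_token_id code)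

-- ===== LEMMAS AND PROOFS =====

-- proof-only abbreviations
def pvDig (c : Char) : Bool := decide ('0' ≤ c ∧ c ≤ '9')
def pvVal (a : Int) (ds : List Char) : Int := ds.foldl (fun v c => v * 10 + ((c.toNat : Int) - 48)) a
def pvTok (m : Int) : List Char := ['v', 'a', 'r', '_'] ++ PySem.Int.toChars m ++ ['_']
def pvCanon (ds : List Char) : Prop :=
  (∀ c ∈ ds, pvDig c = true) ∧ ds ≠ [] ∧ (ds.length = 1 ∨ ds.headD ' ' ≠ '0')

theorem pvDig_iff (c : Char) : pvDig c = true ↔ 48 ≤ c.toNat ∧ c.toNat ≤ 57 := by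
  have h1 : ('0' ≤ c) ↔ 48 ≤ c.toNat := by rw [Char.le_def, UInt32.le_iff_toNat_le]; rfl
  have h2 : (c ≤ '9') ↔ c.toNat ≤ 57 := by rw [Char.le_def, UInt32.le_iff_toNat_le]; rfl
  simp [pvDig, h1, h2]

theorem pvChar_eq_of_toNat (c d : Char) (h : c.toNat = d.toNat) : c = d :=
  Char.ext (UInt32.toNat_inj.mp h)

theorem pvHeadD_append (a b : List Char) (d : Char) (h : a ≠ []) : (a ++ b).headD d = a.headD d := by
  cases a
  · exact absurd rfl h
  · simp

theorem pvVal_shift (ds : List Char) : ∀ a : Int, pvVal a ds = a * 10 ^ ds.length + pvVal 0 ds := by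
  induction ds with
  | nil => intro a; simp [pvVal]
  | cons c t ih =>
    intro a
    have h1 : pvVal a (c :: t) = pvVal (a * 10 + ((c.toNat : Int) - 48)) t := rfl
    have h2 : pvVal 0 (c :: t) = pvVal (0 * 10 + ((c.toNat : Int) - 48)) t := rfl
    rw [h1, h2, ih, ih (0 * 10 + ((c.toNat : Int) - 48))]
    simp [List.length_cons]; ring

theorem pvVal_bounds (ds : List Char) (h : ∀ c ∈ ds, pvDig c = true) :
    0 ≤ pvVal 0 ds ∧ pvVal 0 ds < 10 ^ ds.length := by
  induction ds with
  | nil => simp [pvVal]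
  | cons c t ih =>
    have hc := (pvDig_iff c).mp (h c (by simp))
    have ht := ih (fun x hx => h x (by simp [hx]))
    have h2 : pvVal 0 (c :: t) = pvVal (0 * 10 + ((c.toNat : Int) - 48)) t := rfl
    rw [h2, pvVal_shift]
    have hd0 : (0 : Int) ≤ (c.toNat : Int) - 48 := by omega
    have hd9 : (c.toNat : Int) - 48 ≤ 9 := by omega
    have hpow : (0 : Int) < 10 ^ t.length := by positivity
    constructor
    · nlinarith [ht.1]
    · have hL : (10 : Int) ^ (c :: t).length = 10 * 10 ^ t.length := by
        simp [List.length_cons]; ring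
      rw [hL]
      nlinarith [ht.2]

theorem pvVal_lower (ds : List Char) (h : ∀ c ∈ ds, pvDig c = true) (hne : ds ≠ [])
    (hz : ds.headD ' ' ≠ '0') : 10 ^ (ds.length - 1) ≤ pvVal 0 ds := by
  cases ds with
  | nil => exact absurd rfl hne
  | cons c t =>
    have hc := (pvDig_iff c).mp (h c (by simp))
    have ht := pvVal_bounds t (fun x hx => h x (by simp [hx]))
    have h2 : pvVal 0 (c :: t) = pvVal (0 * 10 + ((c.toNat : Int) - 48)) t := rfl
    rw [h2, pvVal_shift]
    have hd1 : (1 : Int) ≤ (c.toNat : Int) - 48 := by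
      rcases Nat.lt_or_ge 48 c.toNat with h' | h'
      · omega
      · exfalso; apply hz
        have hcn : c.toNat = 48 := by omega
        exact pvChar_eq_of_toNat c '0' (by rw [hcn]; rfl)
    have hpow : (0 : Int) < 10 ^ t.length := by positivity
    have hL : (10 : Int) ^ ((c :: t).length - 1) = 10 ^ t.length := by simp
    rw [hL]
    nlinarith [ht.1]

theorem pvVal_inj_len (ds : List Char) : ∀ (es : List Char), (∀ c ∈ ds, pvDig c = true) →
    (∀ c ∈ es, pvDig c = true) → ds.length = es.length →
    pvVal 0 ds = pvVal 0 es → ds = es := by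
  induction ds with
  | nil =>
    intro es _ _ hlen _
    cases es with
    | nil => rfl
    | cons _ _ => simp at hlen
  | cons c t ih =>
    intro es hd he hlen hv
    cases es with
    | nil => simp at hlen
    | cons c' t' =>
      have hlen' : t.length = t'.length := by simpa using hlen
      have hc := (pvDig_iff c).mp (hd c (by simp))
      have hc' := (pvDig_iff c').mp (he c' (by simp))
      have hbt := pvVal_bounds t (fun x hx => hd x (by simp [hx]))
      have hbt' := pvVal_bounds t' (fun x hx => he x (by simp [hx]))
      rw [hlen'] at hbt
      have e1 : pvVal 0 (c :: t) = ((c.toNat : Int) - 48) * 10 ^ t'.length + pvVal 0 t := by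
        rw [show pvVal 0 (c :: t) = pvVal (0 * 10 + ((c.toNat : Int) - 48)) t from rfl,
          pvVal_shift, hlen']; ring
      have e2 : pvVal 0 (c' :: t') = ((c'.toNat : Int) - 48) * 10 ^ t'.length + pvVal 0 t' := by
        rw [show pvVal 0 (c' :: t') = pvVal (0 * 10 + ((c'.toNat : Int) - 48)) t' from rfl,
          pvVal_shift]; ring
      rw [e1, e2] at hv
      have hpow : (0 : Int) < 10 ^ t'.length := by positivity
      have hdg : ((c.toNat : Int) - 48) = ((c'.toNat : Int) - 48) := by
        by_contra hne
        rcases lt_or_gt_of_ne hne with h' | h'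
        · have hxx : (1 : Int) * 10 ^ t'.length ≤ ((c'.toNat : Int) - 48 - ((c.toNat : Int) - 48)) * 10 ^ t'.length :=
            mul_le_mul_of_nonneg_right (by omega) (le_of_lt hpow)
          linarith [hbt.1, hbt.2, hbt'.1, hbt'.2]
        · have hxx : (1 : Int) * 10 ^ t'.length ≤ (((c.toNat : Int) - 48) - ((c'.toNat : Int) - 48)) * 10 ^ t'.length :=
            mul_le_mul_of_nonneg_right (by omega) (le_of_lt hpow)
          linarith [hbt.1, hbt.2, hbt'.1, hbt'.2]
      have hceq : c = c' := pvChar_eq_of_toNat c c' (by omega)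
      have hteq : t = t' := by
        apply ih t' (fun x hx => hd x (by simp [hx])) (fun x hx => he x (by simp [hx])) hlen'
        nlinarith [hv, hdg]
      rw [hceq, hteq]

theorem pvVal_inj (ds es : List Char) (hd : pvCanon ds) (he : pvCanon es)
    (hv : pvVal 0 ds = pvVal 0 es) : ds = es := by
  obtain ⟨hd1, hd2, hd3⟩ := hd
  obtain ⟨he1, he2, he3⟩ := he
  have key : ∀ (xs ys : List Char), (∀ c ∈ xs, pvDig c = true) → (∀ c ∈ ys, pvDig c = true) →
      xs ≠ [] → (ys.length = 1 ∨ ys.headD ' ' ≠ '0') → xs.length < ys.length →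
      pvVal 0 xs < pvVal 0 ys := by
    intro xs ys hxs hys hxne hyc hlt
    have hxb := pvVal_bounds xs hxs
    have hyne : ys ≠ [] := by
      intro h; rw [h] at hlt; simp at hlt
    rcases hyc with h1 | h1
    · exfalso
      have hx0 : xs.length = 0 := by omega
      exact hxne (List.eq_nil_of_length_eq_zero hx0)
    · have hyl := pvVal_lower ys hys hyne h1
      have hmono : (10 : Int) ^ xs.length ≤ 10 ^ (ys.length - 1) := by
        apply pow_le_pow_right₀ (by norm_num)
        omega
      linarith [hxb.2]
  have hlen : ds.length = es.length := by
    by_contra hne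
    rcases Nat.lt_or_ge ds.length es.length with h' | h'
    · have := key ds es hd1 he1 hd2 he3 h'
      omega
    · have h'' : es.length < ds.length := by omega
      have := key es ds he1 hd1 he2 hd3 h''
      omega
  exact pvVal_inj_len ds es hd1 he1 hlen hv

-- str(n) facts for 0 ≤ n < 1000, established by computation
def pvTCok (n : Nat) : Bool :=
  let ds := PySem.Int.toChars (n : Int)
  ds.all pvDig && decide (ds ≠ []) && (decide (ds.length = 1) || decide (ds.headD ' ' ≠ '0')) &&
    (pvVal 0 ds == (n : Int))

set_option maxRecDepth 20000 in
theorem pvTC_all : (List.range 1000).all pvTCok = true := by decide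

theorem pvTC (m : Int) (h0 : 0 ≤ m) (h1 : m < 1000) :
    pvCanon (PySem.Int.toChars m) ∧ pvVal 0 (PySem.Int.toChars m) = m := by
  have hm : m = ((m.toNat : Nat) : Int) := by omega
  have hmem : m.toNat ∈ List.range 1000 := by
    rw [List.mem_range]; omega
  have hall := (List.all_eq_true.mp pvTC_all) _ hmem
  simp only [pvTCok, Bool.and_eq_true, Bool.or_eq_true, List.all_eq_true, decide_eq_true_eq,
    beq_iff_eq] at hall
  rw [← hm] at hall
  exact ⟨⟨hall.1.1.1, hall.1.1.2, hall.1.2⟩, hall.2⟩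

theorem pvDigits_eq (t : List Char) : ∀ (a : Int) (nd : Nat),
    pvDigits t a nd = (pvVal a (t.takeWhile pvDig), nd + (t.takeWhile pvDig).length, t.dropWhile pvDig) := by
  induction t with
  | nil => intro a nd; simp [pvDigits, pvVal]
  | cons c t ih =>
    intro a nd
    by_cases h : '0' ≤ c ∧ c ≤ '9'
    · have hb : pvDig c = true := by simp [pvDig, h]
      rw [show pvDigits (c :: t) a nd = pvDigits t (a * 10 + ((c.toNat : Int) - 48)) (nd + 1) from by
        rw [pvDigits.eq_def]; simp [if_pos h]]
      rw [ih]
      have hv : pvVal a (c :: t.takeWhile pvDig) = pvVal (a * 10 + ((c.toNat : Int) - 48)) (t.takeWhile pvDig) := rfl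
      simp only [List.takeWhile_cons, hb, if_true, List.dropWhile_cons, List.length_cons, Prod.mk.injEq]
      exact ⟨hv.symm, by omega, trivial⟩
    · have hb : pvDig c = false := by simp [pvDig, h]
      rw [show pvDigits (c :: t) a nd = (a, nd, c :: t) from by rw [pvDigits.eq_def]; simp [if_neg h]]
      simp [hb, pvVal]

theorem pvDig_underscore : pvDig '_' = false := by decide

-- the token parser is exact: pvTokId u = some v iff "var_" + str(v) + "_" is a prefix of u and v < 1000
theorem pvTokId_some (u : List Char) (v : Int) (h : pvTokId u = some v) :
    0 ≤ v ∧ v < 1000 ∧ pvTok v <+: u := by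
  rw [pvTokId.eq_def] at h
  split at h
  case h_2 => simp at h
  case h_1 t =>
    rw [pvDigits_eq] at h
    simp only at h
    split at h
    next heq => simp at h
    next c r' heq =>
      split_ifs at h with h1 h2 h3 h4
      · set ds := t.takeWhile pvDig with hds
        have hdsne : ds ≠ [] := by
          intro hh; apply h1; rw [hh]; simp
        have hc : c = '_' := by simpa using h2
        have hdig : ∀ x ∈ ds, pvDig x = true := fun x hx => List.mem_takeWhile_imp hx
        have hcanon : pvCanon ds := by
          refine ⟨hdig, hdsne, ?_⟩
          by_cases hl : ds.length = 1
          · exact Or.inl hl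
          · right
            have hlen1 : 1 ≤ ds.length := List.length_pos_of_ne_nil hdsne
            have hnd : 1 < 0 + ds.length := by omega
            have hhead : t.headD ' ' = ds.headD ' ' := by
              conv_lhs => rw [← List.takeWhile_append_dropWhile (p := pvDig) (l := t)]
              rw [pvHeadD_append _ _ _ hdsne]
            intro hz
            exact h3 ⟨hnd, by rw [hhead]; exact hz⟩
        have hvv : pvVal 0 ds = v := by simpa using h
        have hbounds := pvVal_bounds ds hdig
        refine ⟨by omega, by omega, ?_⟩
        have htc := pvTC v (by omega) (by omega)
        have hdseq : ds = PySem.Int.toChars v := pvVal_inj ds _ hcanon htc.1 (by rw [hvv, htc.2])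
        have ht : t = ds ++ '_' :: r' := by
          conv_lhs => rw [← List.takeWhile_append_dropWhile (p := pvDig) (l := t)]
          rw [← hds, heq, hc]
        refine ⟨r', ?_⟩
        simp [pvTok, ht, hdseq]

theorem pvTokId_of_prefix (u : List Char) (v : Int) (h0 : 0 ≤ v) (h1 : v < 1000)
    (hp : pvTok v <+: u) : pvTokId u = some v := by
  obtain ⟨rest, hrest⟩ := hp
  obtain ⟨hcanon, hval⟩ := pvTC v h0 h1
  obtain ⟨hdig, hne, hcan⟩ := hcanon
  set ds := PySem.Int.toChars v with hds
  have hu : u = 'v' :: 'a' :: 'r' :: '_' :: (ds ++ '_' :: rest) := by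
    rw [← hrest]; simp [pvTok, hds]
  rw [hu]
  have htw : (ds ++ '_' :: rest).takeWhile pvDig = ds := by
    rw [List.takeWhile_append_of_pos hdig]
    simp [pvDig_underscore]
  have hdw : (ds ++ '_' :: rest).dropWhile pvDig = '_' :: rest := by
    rw [List.dropWhile_append_of_pos hdig]
    simp [pvDig_underscore]
  have hred : pvTokId ('v' :: 'a' :: 'r' :: '_' :: (ds ++ '_' :: rest)) =
      (match pvDigits (ds ++ '_' :: rest) 0 0 with
      | (v', nd, r) =>
        match r with
        | [] => none
        | c :: _ =>
          if nd = 0 then none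
          else if c ≠ '_' then none
          else if 1 < nd ∧ (ds ++ '_' :: rest).headD ' ' = '0' then none
          else if v' < 1000 then some v' else none) := rfl
  rw [hred, pvDigits_eq, htw, hdw]
  simp only
  have hlen1 : 1 ≤ ds.length := List.length_pos_of_ne_nil hne
  rw [if_neg (by omega), if_neg (by simp)]
  have hnolead : ¬(1 < 0 + ds.length ∧ (ds ++ '_' :: rest).headD ' ' = '0') := by
    rintro ⟨hl, hz⟩
    rw [pvHeadD_append _ _ _ hne] at hz
    rcases hcan with hc1 | hc1
    · omega
    · exact hc1 hz
  rw [if_neg hnolead, if_pos (by rw [hval]; exact h1), hval]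

-- the values B's scan extracts, and the scan as a running maximum over them
def pvVals : List Char → List Int
  | [] => []
  | c :: t => (match pvTokId (c :: t) with | some v => [v] | none => []) ++ pvVals t

theorem pvScan_eq (s : List Char) : ∀ b : Int, pvScan s b = (pvVals s).foldl max b := by
  induction s with
  | nil => intro b; simp [pvScan, pvVals]
  | cons c t ih =>
    intro b
    rw [show pvScan (c :: t) b = pvScan t (match pvTokId (c :: t) with
        | some v => if v > b then v else b | none => b) from rfl]
    rw [show pvVals (c :: t) = (match pvTokId (c :: t) with | some v => [v] | none => []) ++ pvVals t from rfl]
    rw [List.foldl_append, ih]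
    congr 1
    match pvTokId (c :: t) with
    | some v =>
      simp only [List.foldl_cons, List.foldl_nil]
      rcases le_or_gt v b with h | h
      · rw [if_neg (by omega), max_eq_left h]
      · rw [if_pos h, max_eq_right (le_of_lt h)]
    | none => simp

theorem mem_pvVals (x : Int) (s : List Char) :
    x ∈ pvVals s ↔ ∃ u, u <:+ s ∧ pvTokId u = some x := by
  induction s with
  | nil =>
    simp only [pvVals, List.not_mem_nil, false_iff]
    rintro ⟨u, hu, hx⟩
    rw [List.suffix_nil.mp hu] at hx
    simp [pvTokId] at hx
  | cons c t ih =>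
    rw [show pvVals (c :: t) = (match pvTokId (c :: t) with | some v => [v] | none => []) ++ pvVals t from rfl]
    rw [List.mem_append, ih]
    constructor
    · rintro (h | ⟨u, hu, hx⟩)
      · refine ⟨c :: t, List.suffix_refl _, ?_⟩
        revert h
        match htok : pvTokId (c :: t) with
        | some v => intro h; simp at h; rw [h]
        | none => intro h; simp at h
      · exact ⟨u, hu.trans (List.suffix_cons c t), hx⟩
    · rintro ⟨u, hu, hx⟩
      rcases List.suffix_cons_iff.mp hu with h | h
      · left; rw [h] at hx; rw [hx]; simp
      · right; exact ⟨u, h, hx⟩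

-- A's loop body, and A's loop as 1 + a running maximum over the present token ids
def pvAStep (L : List Char) (h idx : Int) : Int :=
  if PySem.Chars.isIn (['v', 'a', 'r', '_'] ++ PySem.Int.toChars idx ++ ['_']) L then idx + 1 else h

theorem pvA_eq (L : List Char) (n : Nat) :
    (List.map (fun k : Nat => (k : Int)) (List.range n)).foldl (pvAStep L) 1 =
      1 + ((List.map (fun k : Nat => (k : Int)) (List.range n)).filter
            (fun m => PySem.Chars.isIn (pvTok m) L)).foldl max 0 := by
  induction n with
  | zero => simp
  | succ n ih =>
    rw [List.range_succ, List.map_append, List.filter_append, List.foldl_append, List.foldl_append, ih]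
    simp only [List.map_cons, List.map_nil, List.filter_cons]
    set F := ((List.map (fun k : Nat => (k : Int)) (List.range n)).filter
            (fun m => PySem.Chars.isIn (pvTok m) L)).foldl max 0 with hF
    have hFle : F ≤ (n : Int) := by
      rcases PySem.List.foldl_max_mem ((List.map (fun k : Nat => (k : Int)) (List.range n)).filter
            (fun m => PySem.Chars.isIn (pvTok m) L)) 0 with h | h
      · rw [hF, h]; omega
      · rw [List.mem_filter, List.mem_map] at h
        obtain ⟨⟨k, hk, hkx⟩, _⟩ := h.imp_left id
        rw [List.mem_range] at hk
        omega
    by_cases hP : PySem.Chars.isIn (pvTok (n : Int)) L = true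
    · rw [if_pos (by simpa [pvTok] using hP)]
      simp only [pvAStep, List.foldl_cons, List.foldl_nil]
      rw [if_pos (by simpa [pvTok] using hP)]
      rw [max_eq_right hFle]
      simp only [List.filter_nil, List.foldl_nil]
      omega
    · rw [if_neg (by simpa [pvTok] using hP)]
      simp only [pvAStep, List.foldl_cons, List.foldl_nil]
      rw [if_neg (by simpa [pvTok] using hP)]
      simp

theorem pvFoldlMax_eq (l l' : List Int) (h : ∀ x, x ∈ l ↔ x ∈ l') :
    l.foldl max 0 = l'.foldl max 0 := by
  apply le_antisymm
  · rcases PySem.List.foldl_max_mem l 0 with h0 | h0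
    · rw [h0]; exact (PySem.List.le_foldl_max l' 0).1
    · exact (PySem.List.le_foldl_max l' 0).2 _ ((h _).mp h0)
  · rcases PySem.List.foldl_max_mem l' 0 with h0 | h0
    · rw [h0]; exact (PySem.List.le_foldl_max l 0).1
    · exact (PySem.List.le_foldl_max l 0).2 _ ((h _).mpr h0)

theorem pvFinal (code : String) :
    (PySem.List.pyRange 0 1000).foldl (pvAStep code.toList) 1 = pvScan code.toList 0 + 1 := by
  have h1000 : (1000 : Int) = ((1000 : Nat) : Int) := by norm_num
  rw [h1000, PySem.List.pyRange_zero_natCast, pvA_eq, pvScan_eq]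
  rw [pvFoldlMax_eq _ (pvVals code.toList) ?_]
  · omega
  · intro x
    rw [List.mem_filter, List.mem_map, mem_pvVals]
    constructor
    · rintro ⟨⟨k, hk, hkx⟩, hin⟩
      rw [List.mem_range] at hk
      have hinf : pvTok x <:+: code.toList := (PySem.Chars.isIn_iff_infix _ _).mp hin
      obtain ⟨u, hpre, hsuf⟩ := List.infix_iff_prefix_suffix.mp hinf
      exact ⟨u, hsuf, pvTokId_of_prefix u x (by omega) (by omega) hpre⟩
    · rintro ⟨u, hu, hx⟩
      obtain ⟨h0, h1, hp⟩ := pvTokId_some u x hx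
      refine ⟨⟨x.toNat, ?_, by omega⟩, ?_⟩
      · rw [List.mem_range]; omega
      · rw [PySem.Chars.isIn_iff_infix]
        exact List.infix_iff_prefix_suffix.mpr ⟨u, hp, hu⟩

-- ===== VERDICT (by name: the statement is the Claim_ definition above) =====
theorem get_highest_variable_token_id_spec : Claim_equal_get_highest_variable_token_id := by
  intro code _
  show get_highest_variable_token_id code = get_highest_variable_token_id_alt code
  exact pvFinal code
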